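-- pv_equiv track=rewrite | github.com/nasa/opera-sds-pcm | data_subscriber/disp_static/disp_static_query.py | reduce_cslc_bursts_to_cmr_patterns
-- ===== SOURCE A (Python) =====
-- from collections import defaultdict
--
-- def reduce_cslc_bursts_to_cmr_patterns(cslc_native_id_patterns_burst_sets):
--     native_id_pattern_tree = tree()
--     for pattern in cslc_native_id_patterns_burst_sets:
--         native_id_pattern_tree[pattern[:-7]][pattern[:-6]][pattern[:-5]][pattern]
--     native_id_pattern_tree = dicts(native_id_pattern_tree)
--
--     cslc_native_id_patterns = set()
--     for k1, v1 in native_id_pattern_tree.items():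
--         if len(v1.keys()) == 10:
--             cslc_native_id_patterns.add(k1)
--         else:
--             for k2, v2 in v1.items():
--                 if len(v2.keys()) == 10:
--                     cslc_native_id_patterns.add(k2)
--                 else:
--                     for k3, v3 in v2.items():
--                         if len(v3.keys()) == 3:  # got to the list of full native-ids
--                             cslc_native_id_patterns.add(k3)
--                         else:
--                             cslc_native_id_patterns.update(set(v3.keys()))  # all the individual beams (1/3 or 2/3)
--     cslc_native_id_patterns = {p + "*" for p in cslc_native_id_patterns}
--     return cslc_native_id_patterns
--
-- def tree():
--     """
--     Simple implementation of a tree data structure in python. Essentially a defaultdict of default dicts.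
--
--     Usage: foo = tree() ; foo["a"]["b"]["c"]... = bar
--     """
--     return defaultdict(tree)
--
-- def dicts(t):
--     """Utility function for casting a tree to a complex dict"""
--     return {k: dicts(t[k]) for k in t}
-- ===== SOURCE B (Python) =====
-- def reduce_cslc_bursts_to_cmr_patterns(cslc_native_id_patterns_burst_sets):
--     # Build the prefix trie with plain nested dicts via setdefault, then collapse
--     # it with one recursive walk driven by a threshold table.
--     trie = {}
--     for pattern in cslc_native_id_patterns_burst_sets:
--         node = trie.setdefault(pattern[:-7], {})
--         node = node.setdefault(pattern[:-6], {})
--         node = node.setdefault(pattern[:-5], {})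
--         node.setdefault(pattern, None)
--
--     thresholds = [10, 10, 3]
--     result = set()
--
--     def collapse(node, depth):
--         for key, child in node.items():
--             if len(child) == thresholds[depth]:
--                 result.add(key)
--             elif depth == 2:
--                 result.update(child.keys())
--             else:
--                 collapse(child, depth + 1)
--
--     collapse(trie, 0)
--     return {p + "*" for p in result}
-- ===== Notes on version B (the rewrite author's own statement) =====
-- stated objective: simpler
-- what changed: A's defaultdict tree() + dicts() conversion + three copy-pasted nested loops with per-level thresholds are replaced by plain nested dicts built with setdefault and one recursive collapse(node, depth) walk driven by a thresholds table [10, 10, 3].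
import Mathlib
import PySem

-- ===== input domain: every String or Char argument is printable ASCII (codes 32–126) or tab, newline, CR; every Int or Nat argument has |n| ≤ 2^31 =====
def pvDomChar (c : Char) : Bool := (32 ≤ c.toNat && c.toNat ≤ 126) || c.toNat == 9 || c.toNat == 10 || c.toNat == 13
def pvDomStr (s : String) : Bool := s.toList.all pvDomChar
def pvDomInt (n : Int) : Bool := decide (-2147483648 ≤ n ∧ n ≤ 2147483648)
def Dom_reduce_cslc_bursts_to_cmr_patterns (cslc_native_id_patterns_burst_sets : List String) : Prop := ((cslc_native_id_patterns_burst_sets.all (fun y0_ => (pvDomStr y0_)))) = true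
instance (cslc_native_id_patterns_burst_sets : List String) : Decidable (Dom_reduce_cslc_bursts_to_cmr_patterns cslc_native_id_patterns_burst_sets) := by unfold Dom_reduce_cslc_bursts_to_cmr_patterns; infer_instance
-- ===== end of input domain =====

-- B builds the prefix trie as one uniform tree via setdefault-style path insertion and
-- collapses it with ONE recursive walk driven by a threshold table, replacing A's
-- defaultdict tree + dicts() conversion + three hand-written nested loops (objective:
-- simpler; the returned Python set is modelled as its insertion-ordered element list).

-- ===== PORT A =====
-- A's tree(): nested defaultdicts, modelled level by level (leaf values are Unit).
abbrev ATree0 := PySem.Dict String Unit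
abbrev ATree1 := PySem.Dict String ATree0
abbrev ATree2 := PySem.Dict String ATree1
abbrev ATree3 := PySem.Dict String ATree2

-- A's dicts(): {k: dicts(t[k]) for k in t}, one level per tree depth.
def dicts0 (d : ATree0) : ATree0 := PySem.Dict.mk (d.items.map (fun kv => (kv.1, ())))
def dicts1 (d : ATree1) : ATree1 := PySem.Dict.mk (d.items.map (fun kv => (kv.1, dicts0 kv.2)))
def dicts2 (d : ATree2) : ATree2 := PySem.Dict.mk (d.items.map (fun kv => (kv.1, dicts1 kv.2)))
def dicts3 (d : ATree3) : ATree3 := PySem.Dict.mk (d.items.map (fun kv => (kv.1, dicts2 kv.2)))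

def reduce_cslc_bursts_to_cmr_patterns (cslc_native_id_patterns_burst_sets : List String) : List String :=
  -- tree[p[:-7]][p[:-6]][p[:-5]][p] : chained defaultdict access = read-or-create at each
  -- level; the mutation through the returned aliases is ported as writing the updated
  -- children back.
  let t : ATree3 := cslc_native_id_patterns_burst_sets.foldl (fun t p =>
    let k1 := PySem.Str.slice p none (some (-7))
    let k2 := PySem.Str.slice p none (some (-6))
    let k3 := PySem.Str.slice p none (some (-5))
    let v1 := t.getD k1 PySem.Dict.empty
    let v2 := v1.getD k2 PySem.Dict.empty
    let v3 := v2.getD k3 PySem.Dict.empty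
    t.insert k1 (v1.insert k2 (v2.insert k3 (v3.insert p ())))) PySem.Dict.empty
  let t := dicts3 t
  let s : PySem.Set String := t.items.foldl (fun s kv1 =>
    if kv1.2.keys.length = 10 then PySem.Set.add s kv1.1
    else kv1.2.items.foldl (fun s kv2 =>
      if kv2.2.keys.length = 10 then PySem.Set.add s kv2.1
      else kv2.2.items.foldl (fun s kv3 =>
        if kv3.2.keys.length = 3 then PySem.Set.add s kv3.1
        else PySem.Set.update s (PySem.Set.ofList kv3.2.keys)) s) s) PySem.Set.empty
  PySem.Set.ofList (s.map (fun p => p ++ "*"))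

-- ===== PORT B =====
-- B's trie of plain nested dicts: one uniform string-keyed tree (explicit child-list type,
-- since a nested 'List (String × BTrie)' constructor is not allowed).
mutual
inductive BTrie where
  | node : BTrieL → BTrie
inductive BTrieL where
  | nil : BTrieL
  | cons : String → BTrie → BTrieL → BTrieL
end

def btrieLen : BTrieL → Nat
  | .nil => 0
  | .cons _ _ r => btrieLen r + 1

def btrieKeys : BTrieL → List String
  | .nil => []
  | .cons k _ r => k :: btrieKeys r

-- node = node.setdefault(k, {}) chained along the path, final leaf setdefault(p, None):
-- the Python mutates the shared nodes in place; ported as one update along the key path.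
def btrieSetPath : BTrieL → List String → BTrieL
  | l, [] => l
  | .nil, k :: ks => .cons k (.node (btrieSetPath .nil ks)) .nil
  | .cons k' (.node c) r, k :: ks =>
    if k' == k then .cons k' (.node (btrieSetPath c ks)) r
    else .cons k' (.node c) (btrieSetPath r (k :: ks))
termination_by l ks => (ks.length, sizeOf l)

-- collapse(node, depth) with thresholds = [10, 10, 3]; the recursion only ever reaches
-- depth 0..2, so thresholds[depth] cannot raise; ported with List.getD.
def btrieCollapse (l : BTrieL) (depth : Nat) (acc : PySem.Set String) : PySem.Set String :=
  match l with
  | .nil => acc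
  | .cons k (.node c) rest =>
    let acc' :=
      if btrieLen c = [10, 10, 3].getD depth 0 then PySem.Set.add acc k
      else if depth = 2 then PySem.Set.update acc (btrieKeys c)
      else btrieCollapse c (depth + 1) acc
    btrieCollapse rest depth acc'

def reduce_cslc_bursts_to_cmr_patterns_alt (cslc_native_id_patterns_burst_sets : List String) : List String :=
  let trie := cslc_native_id_patterns_burst_sets.foldl (fun l p =>
    btrieSetPath l [PySem.Str.slice p none (some (-7)), PySem.Str.slice p none (some (-6)),
                    PySem.Str.slice p none (some (-5)), p]) BTrieL.nil
  let result := btrieCollapse trie 0 PySem.Set.empty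
  PySem.Set.ofList (result.map (fun p => p ++ "*"))

-- ===== PRECONDITION & SPEC =====
def Spec_reduce_cslc_bursts_to_cmr_patterns (cslc_native_id_patterns_burst_sets : List String) (out : List String) : Prop := out = reduce_cslc_bursts_to_cmr_patterns_alt cslc_native_id_patterns_burst_sets
instance (cslc_native_id_patterns_burst_sets : List String) (out : List String) : Decidable (Spec_reduce_cslc_bursts_to_cmr_patterns cslc_native_id_patterns_burst_sets out) := by unfold Spec_reduce_cslc_bursts_to_cmr_patterns; infer_instance

-- ===== CLAIM (what is proved, stated in full; the proofs are below) =====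
def Claim_equal_reduce_cslc_bursts_to_cmr_patterns : Prop := ∀ (cslc_native_id_patterns_burst_sets : List String), Dom_reduce_cslc_bursts_to_cmr_patterns cslc_native_id_patterns_burst_sets → Spec_reduce_cslc_bursts_to_cmr_patterns cslc_native_id_patterns_burst_sets (reduce_cslc_bursts_to_cmr_patterns cslc_native_id_patterns_burst_sets)

-- ===== LEMMAS AND PROOFS =====

-- dicts() is the identity on this representation.
lemma dicts0_id (d : ATree0) : dicts0 d = d := by
  cases d with
  | mk l => simp [dicts0]

lemma dicts1_id (d : ATree1) : dicts1 d = d := by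
  cases d with
  | mk l => simp [dicts1, dicts0_id]

lemma dicts2_id (d : ATree2) : dicts2 d = d := by
  cases d with
  | mk l => simp [dicts2, dicts1_id]

lemma dicts3_id (d : ATree3) : dicts3 d = d := by
  cases d with
  | mk l => simp [dicts3, dicts2_id]

-- conversion of A's nested dicts (their items lists) into B's trie shape
def conv0 : List (String × Unit) → BTrieL
  | [] => .nil
  | (k, _) :: r => .cons k (.node .nil) (conv0 r)
def conv1 : List (String × ATree0) → BTrieL
  | [] => .nil
  | (k, v) :: r => .cons k (.node (conv0 v.items)) (conv1 r)
def conv2 : List (String × ATree1) → BTrieL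
  | [] => .nil
  | (k, v) :: r => .cons k (.node (conv1 v.items)) (conv2 r)
def conv3 : List (String × ATree2) → BTrieL
  | [] => .nil
  | (k, v) :: r => .cons k (.node (conv2 v.items)) (conv3 r)

-- nodup-keys invariant at every level of A's tree
def Inv0 (d : ATree0) : Prop := d.keys.Nodup
def Inv1 (d : ATree1) : Prop := d.keys.Nodup ∧ ∀ kv ∈ d.items, Inv0 kv.2
def Inv2 (d : ATree2) : Prop := d.keys.Nodup ∧ ∀ kv ∈ d.items, Inv1 kv.2
def Inv3 (d : ATree3) : Prop := d.keys.Nodup ∧ ∀ kv ∈ d.items, Inv2 kv.2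

lemma items_insert_cons_ne {ν : Type} (k p : String) (v : ν) (x : ν) (r : List (String × ν))
    (h : k ≠ p) :
    ((PySem.Dict.mk ((k, v) :: r)).insert p x).items = (k, v) :: ((PySem.Dict.mk r).insert p x).items := by
  have hb : (k == p) = false := by simp [h]
  simp only [PySem.Dict.insert, PySem.Dict.contains, List.any_cons, hb, Bool.false_or]
  split
  · simp only [List.map_cons, hb, Bool.false_eq_true, if_false]
  · rfl

lemma items_insert_head_self {ν : Type} (k : String) (v x : ν) (r : List (String × ν))
    (h : k ∉ r.map Prod.fst) :
    ((PySem.Dict.mk ((k, v) :: r)).insert k x).items = (k, x) :: r := by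
  have hr : (r.any fun q => q.1 == k) = false := by
    simp only [List.any_eq_false]
    intro q hq
    simp only [beq_iff_eq]
    exact fun hk => h (hk ▸ List.mem_map_of_mem hq)
  simp only [PySem.Dict.insert, PySem.Dict.contains, List.any_cons, hr, BEq.refl, Bool.or_false,
    if_pos]
  simp only [List.map_cons, BEq.refl, if_pos]
  have hc : ∀ q ∈ r, (if (q.1 == k) = true then (k, x) else q) = q := by
    intro q hq
    have := List.any_eq_false.mp hr q hq
    simp [this]
  rw [List.map_congr_left hc]
  simp

lemma items_insert_nil {ν : Type} (p : String) (x : ν) :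
    ((PySem.Dict.mk ([] : List (String × ν))).insert p x).items = [(p, x)] := by
  simp [PySem.Dict.insert, PySem.Dict.contains]

lemma getD_mk_cons {ν : Type} (k x : String) (v d0 : ν) (r : List (String × ν)) :
    (PySem.Dict.mk ((k, v) :: r)).getD x d0 = if k = x then v else (PySem.Dict.mk r).getD x d0 := by
  simp [PySem.Dict.getD, PySem.Dict.get?_mk_cons]
  split <;> simp

lemma getD_mk_nil {ν : Type} (x : String) (d0 : ν) :
    (PySem.Dict.mk ([] : List (String × ν))).getD x d0 = d0 := rfl

lemma step0 (l : List (String × Unit)) (p : String) (h : (l.map Prod.fst).Nodup) :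
    btrieSetPath (conv0 l) [p] = conv0 (((PySem.Dict.mk l).insert p ()).items) := by
  induction l with
  | nil => simp [conv0, btrieSetPath, items_insert_nil]
  | cons kv r ih =>
    obtain ⟨k, v⟩ := kv
    simp only [List.map_cons, List.nodup_cons] at h
    by_cases hk : k = p
    · subst hk
      rw [items_insert_head_self k v () r h.1]
      simp [conv0, btrieSetPath]
    · rw [items_insert_cons_ne k p v () r hk]
      simp only [conv0, btrieSetPath, beq_iff_eq, hk, if_false]
      rw [ih h.2]

lemma step1 (l : List (String × ATree0)) (k3 p : String) (h : (l.map Prod.fst).Nodup)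
    (hin : ∀ kv ∈ l, Inv0 kv.2) :
    btrieSetPath (conv1 l) [k3, p]
      = conv1 (((PySem.Dict.mk l).insert k3
          (((PySem.Dict.mk l).getD k3 PySem.Dict.empty).insert p ())).items) := by
  induction l with
  | nil =>
    simp [conv1, conv0, btrieSetPath, items_insert_nil, getD_mk_nil, PySem.Dict.empty]
  | cons kv r ih =>
    obtain ⟨k, v⟩ := kv
    simp only [List.map_cons, List.nodup_cons] at h
    rw [getD_mk_cons]
    by_cases hk : k = k3
    · subst hk
      rw [if_pos rfl, items_insert_head_self k v _ r h.1]
      simp only [conv1, btrieSetPath, BEq.refl, if_pos]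
      rw [step0 v.items p (hin (k, v) (by simp))]
    · rw [if_neg hk, items_insert_cons_ne k k3 v _ r hk]
      simp only [conv1, btrieSetPath, beq_iff_eq, hk, if_false]
      rw [ih h.2 (fun kv hkv => hin kv (List.mem_cons_of_mem _ hkv))]

lemma step2 (l : List (String × ATree1)) (k2 k3 p : String) (h : (l.map Prod.fst).Nodup)
    (hin : ∀ kv ∈ l, Inv1 kv.2) :
    btrieSetPath (conv2 l) [k2, k3, p]
      = conv2 (((PySem.Dict.mk l).insert k2
          (((PySem.Dict.mk l).getD k2 PySem.Dict.empty).insert k3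
            ((((PySem.Dict.mk l).getD k2 PySem.Dict.empty).getD k3 PySem.Dict.empty).insert p ()))).items) := by
  induction l with
  | nil =>
    simp [conv2, conv1, conv0, btrieSetPath, items_insert_nil, getD_mk_nil, PySem.Dict.empty]
  | cons kv r ih =>
    obtain ⟨k, v⟩ := kv
    simp only [List.map_cons, List.nodup_cons] at h
    rw [getD_mk_cons]
    by_cases hk : k = k2
    · subst hk
      rw [if_pos rfl, items_insert_head_self k v _ r h.1]
      simp only [conv2, btrieSetPath, BEq.refl, if_pos]
      have hv := hin (k, v) (by simp)
      rw [step1 v.items k3 p hv.1 (fun kv hkv => hv.2 kv hkv)]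
    · rw [if_neg hk, items_insert_cons_ne k k2 v _ r hk]
      simp only [conv2, btrieSetPath, beq_iff_eq, hk, if_false]
      rw [ih h.2 (fun kv hkv => hin kv (List.mem_cons_of_mem _ hkv))]

lemma step3 (l : List (String × ATree2)) (k1 k2 k3 p : String) (h : (l.map Prod.fst).Nodup)
    (hin : ∀ kv ∈ l, Inv2 kv.2) :
    btrieSetPath (conv3 l) [k1, k2, k3, p]
      = conv3 (((PySem.Dict.mk l).insert k1
          (((PySem.Dict.mk l).getD k1 PySem.Dict.empty).insert k2
            ((((PySem.Dict.mk l).getD k1 PySem.Dict.empty).getD k2 PySem.Dict.empty).insert k3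
              (((((PySem.Dict.mk l).getD k1 PySem.Dict.empty).getD k2 PySem.Dict.empty).getD k3
                  PySem.Dict.empty).insert p ())))).items) := by
  induction l with
  | nil =>
    simp [conv3, conv2, conv1, conv0, btrieSetPath, items_insert_nil, getD_mk_nil, PySem.Dict.empty]
  | cons kv r ih =>
    obtain ⟨k, v⟩ := kv
    simp only [List.map_cons, List.nodup_cons] at h
    rw [getD_mk_cons]
    by_cases hk : k = k1
    · subst hk
      rw [if_pos rfl, items_insert_head_self k v _ r h.1]
      simp only [conv3, btrieSetPath, BEq.refl, if_pos]
      have hv := hin (k, v) (by simp)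
      rw [step2 v.items k2 k3 p hv.1 (fun kv hkv => hv.2 kv hkv)]
    · rw [if_neg hk, items_insert_cons_ne k k1 v _ r hk]
      simp only [conv3, btrieSetPath, beq_iff_eq, hk, if_false]
      rw [ih h.2 (fun kv hkv => hin kv (List.mem_cons_of_mem _ hkv))]

lemma inv0_empty : Inv0 PySem.Dict.empty := by simp [Inv0]
lemma inv1_empty : Inv1 PySem.Dict.empty := by
  constructor
  · simp
  · intro kv hkv; simp [PySem.Dict.empty] at hkv
lemma inv2_empty : Inv2 PySem.Dict.empty := by
  constructor
  · simp
  · intro kv hkv; simp [PySem.Dict.empty] at hkv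
lemma inv3_empty : Inv3 PySem.Dict.empty := by
  constructor
  · simp
  · intro kv hkv; simp [PySem.Dict.empty] at hkv

lemma inv0_getD (d : ATree1) (k : String) (h : Inv1 d) : Inv0 (d.getD k PySem.Dict.empty) := by
  rw [PySem.Dict.getD_eq_get?_getD]
  cases hg : d.get? k with
  | none => exact inv0_empty
  | some v => exact h.2 (k, v) (PySem.Dict.mem_items_of_get?_eq_some d hg)

lemma inv1_getD (d : ATree2) (k : String) (h : Inv2 d) : Inv1 (d.getD k PySem.Dict.empty) := by
  rw [PySem.Dict.getD_eq_get?_getD]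
  cases hg : d.get? k with
  | none => exact inv1_empty
  | some v => exact h.2 (k, v) (PySem.Dict.mem_items_of_get?_eq_some d hg)

lemma inv2_getD (d : ATree3) (k : String) (h : Inv3 d) : Inv2 (d.getD k PySem.Dict.empty) := by
  rw [PySem.Dict.getD_eq_get?_getD]
  cases hg : d.get? k with
  | none => exact inv2_empty
  | some v => exact h.2 (k, v) (PySem.Dict.mem_items_of_get?_eq_some d hg)

lemma inv0_insert (d : ATree0) (k : String) (h : Inv0 d) : Inv0 (d.insert k ()) :=
  PySem.Dict.nodup_keys_insert d k () h
lemma inv1_insert (d : ATree1) (k : String) (v : ATree0) (h : Inv1 d) (hv : Inv0 v) :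
    Inv1 (d.insert k v) := by
  refine ⟨PySem.Dict.nodup_keys_insert d k v h.1, ?_⟩
  intro kv hkv
  rcases (PySem.Dict.mem_items_insert d k v kv).mp hkv with h1 | h1
  · rw [h1]; exact hv
  · exact h.2 kv h1.1
lemma inv2_insert (d : ATree2) (k : String) (v : ATree1) (h : Inv2 d) (hv : Inv1 v) :
    Inv2 (d.insert k v) := by
  refine ⟨PySem.Dict.nodup_keys_insert d k v h.1, ?_⟩
  intro kv hkv
  rcases (PySem.Dict.mem_items_insert d k v kv).mp hkv with h1 | h1
  · rw [h1]; exact hv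
  · exact h.2 kv h1.1
lemma inv3_insert (d : ATree3) (k : String) (v : ATree2) (h : Inv3 d) (hv : Inv2 v) :
    Inv3 (d.insert k v) := by
  refine ⟨PySem.Dict.nodup_keys_insert d k v h.1, ?_⟩
  intro kv hkv
  rcases (PySem.Dict.mem_items_insert d k v kv).mp hkv with h1 | h1
  · rw [h1]; exact hv
  · exact h.2 kv h1.1

-- A's per-pattern tree-building step, named for the induction.
def stepA (t : ATree3) (p : String) : ATree3 :=
  let k1 := PySem.Str.slice p none (some (-7))
  let k2 := PySem.Str.slice p none (some (-6))
  let k3 := PySem.Str.slice p none (some (-5))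
  let v1 := t.getD k1 PySem.Dict.empty
  let v2 := v1.getD k2 PySem.Dict.empty
  let v3 := v2.getD k3 PySem.Dict.empty
  t.insert k1 (v1.insert k2 (v2.insert k3 (v3.insert p ())))

lemma inv3_step (t : ATree3) (p : String) (h : Inv3 t) : Inv3 (stepA t p) := by
  show Inv3 (t.insert _ _)
  have h1 := inv2_getD t (PySem.Str.slice p none (some (-7))) h
  have h2 := inv1_getD _ (PySem.Str.slice p none (some (-6))) h1
  have h3 := inv0_getD _ (PySem.Str.slice p none (some (-5))) h2
  exact inv3_insert _ _ _ h (inv2_insert _ _ _ h1 (inv1_insert _ _ _ h2 (inv0_insert _ _ h3)))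

lemma inv3_foldl (bs : List String) (t : ATree3) (h : Inv3 t) : Inv3 (bs.foldl stepA t) := by
  induction bs generalizing t with
  | nil => exact h
  | cons b r ih => exact ih _ (inv3_step t b h)

lemma build_commute (bs : List String) (t : ATree3) (h : Inv3 t) :
    bs.foldl (fun l p => btrieSetPath l [PySem.Str.slice p none (some (-7)),
        PySem.Str.slice p none (some (-6)), PySem.Str.slice p none (some (-5)), p]) (conv3 t.items)
      = conv3 ((bs.foldl stepA t).items) := by
  induction bs generalizing t with
  | nil => rfl
  | cons b r ih =>
    rw [List.foldl_cons, List.foldl_cons]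
    have hstep : btrieSetPath (conv3 t.items) [PySem.Str.slice b none (some (-7)),
        PySem.Str.slice b none (some (-6)), PySem.Str.slice b none (some (-5)), b]
        = conv3 ((stepA t b).items) := by
      cases t with
      | mk l => exact step3 l _ _ _ b h.1 (fun kv hkv => h.2 kv hkv)
    rw [hstep, ih _ (inv3_step t b h)]

lemma update_nodup {α : Type} [BEq α] [LawfulBEq α] (l : List α) (s : PySem.Set α)
    (hd : ∀ x ∈ l, x ∉ s) (hn : l.Nodup) : PySem.Set.update s l = s ++ l := by
  induction l generalizing s with
  | nil => simp [PySem.Set.update]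
  | cons a r ih =>
    have hna : a ∉ s := hd a (by simp)
    have ha : PySem.Set.add s a = s ++ [a] := by
      simp [PySem.Set.add, hna]
    show PySem.Set.update (PySem.Set.add s a) r = _
    rw [ha, ih (s ++ [a]) ?_ hn.of_cons]
    · simp
    · intro x hx
      simp only [List.mem_append, List.mem_singleton]
      rintro (hxs | hxa)
      · exact hd x (List.mem_cons_of_mem _ hx) hxs
      · exact (List.nodup_cons.mp hn).1 (hxa ▸ hx)

lemma ofList_nodup {α : Type} [BEq α] [LawfulBEq α] (l : List α) (h : l.Nodup) :
    PySem.Set.ofList l = l := by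
  have := update_nodup l PySem.Set.empty (by intro x _ hx; simp [PySem.Set.empty] at hx) h
  simpa [PySem.Set.ofList, PySem.Set.update, PySem.Set.empty] using this

lemma len_conv0 (l : List (String × Unit)) : btrieLen (conv0 l) = l.length := by
  induction l with
  | nil => rfl
  | cons kv r ih => obtain ⟨k, v⟩ := kv; simp [conv0, btrieLen, ih]
lemma len_conv1 (l : List (String × ATree0)) : btrieLen (conv1 l) = l.length := by
  induction l with
  | nil => rfl
  | cons kv r ih => obtain ⟨k, v⟩ := kv; simp [conv1, btrieLen, ih]
lemma len_conv2 (l : List (String × ATree1)) : btrieLen (conv2 l) = l.length := by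
  induction l with
  | nil => rfl
  | cons kv r ih => obtain ⟨k, v⟩ := kv; simp [conv2, btrieLen, ih]
lemma keys_conv0 (l : List (String × Unit)) : btrieKeys (conv0 l) = l.map Prod.fst := by
  induction l with
  | nil => rfl
  | cons kv r ih => obtain ⟨k, v⟩ := kv; simp [conv0, btrieKeys, ih]

lemma keys_length (d : ATree0) : d.keys.length = d.items.length := by
  simp [PySem.Dict.keys]
lemma keys_length1 (d : ATree1) : d.keys.length = d.items.length := by
  simp [PySem.Dict.keys]
lemma keys_length2 (d : ATree2) : d.keys.length = d.items.length := by
  simp [PySem.Dict.keys]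

lemma collapse2 (l : List (String × ATree0)) (acc : PySem.Set String)
    (hin : ∀ kv ∈ l, Inv0 kv.2) :
    btrieCollapse (conv1 l) 2 acc
      = l.foldl (fun s kv3 =>
          if kv3.2.keys.length = 3 then PySem.Set.add s kv3.1
          else PySem.Set.update s (PySem.Set.ofList kv3.2.keys)) acc := by
  induction l generalizing acc with
  | nil => rfl
  | cons kv r ih =>
    obtain ⟨k, v⟩ := kv
    simp only [conv1, btrieCollapse, List.foldl_cons]
    rw [len_conv0, keys_conv0, ← keys_length]
    rw [ofList_nodup v.keys (hin (k, v) (by simp))]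
    have hthr : ([10, 10, 3].getD 2 0 : Nat) = 3 := rfl
    rw [hthr]
    by_cases h3 : v.keys.length = 3
    · rw [if_pos h3, if_pos h3]
      exact ih _ (fun kv hkv => hin kv (List.mem_cons_of_mem _ hkv))
    · rw [if_neg h3, if_neg h3]
      simp only [if_true, PySem.Dict.keys]
      exact ih _ (fun kv hkv => hin kv (List.mem_cons_of_mem _ hkv))

lemma collapse1 (l : List (String × ATree1)) (acc : PySem.Set String)
    (hin : ∀ kv ∈ l, Inv1 kv.2) :
    btrieCollapse (conv2 l) 1 acc
      = l.foldl (fun s kv2 =>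
          if kv2.2.keys.length = 10 then PySem.Set.add s kv2.1
          else kv2.2.items.foldl (fun s kv3 =>
            if kv3.2.keys.length = 3 then PySem.Set.add s kv3.1
            else PySem.Set.update s (PySem.Set.ofList kv3.2.keys)) s) acc := by
  induction l generalizing acc with
  | nil => rfl
  | cons kv r ih =>
    obtain ⟨k, v⟩ := kv
    simp only [conv2, btrieCollapse, List.foldl_cons]
    rw [len_conv1, ← keys_length1]
    have hthr : ([10, 10, 3].getD 1 0 : Nat) = 10 := rfl
    rw [hthr]
    have hv := hin (k, v) (by simp)
    by_cases h10 : v.keys.length = 10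
    · rw [if_pos h10, if_pos h10]
      exact ih _ (fun kv hkv => hin kv (List.mem_cons_of_mem _ hkv))
    · rw [if_neg h10, if_neg h10]
      simp only [OfNat.one_ne_ofNat, if_false]
      rw [collapse2 v.items acc (fun kv hkv => hv.2 kv hkv)]
      exact ih _ (fun kv hkv => hin kv (List.mem_cons_of_mem _ hkv))

lemma collapse0 (l : List (String × ATree2)) (acc : PySem.Set String)
    (hin : ∀ kv ∈ l, Inv2 kv.2) :
    btrieCollapse (conv3 l) 0 acc
      = l.foldl (fun s kv1 =>
          if kv1.2.keys.length = 10 then PySem.Set.add s kv1.1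
          else kv1.2.items.foldl (fun s kv2 =>
            if kv2.2.keys.length = 10 then PySem.Set.add s kv2.1
            else kv2.2.items.foldl (fun s kv3 =>
              if kv3.2.keys.length = 3 then PySem.Set.add s kv3.1
              else PySem.Set.update s (PySem.Set.ofList kv3.2.keys)) s) s) acc := by
  induction l generalizing acc with
  | nil => rfl
  | cons kv r ih =>
    obtain ⟨k, v⟩ := kv
    simp only [conv3, btrieCollapse, List.foldl_cons]
    rw [len_conv2, ← keys_length2]
    have hthr : ([10, 10, 3].getD 0 0 : Nat) = 10 := rfl
    rw [hthr]
    have hv := hin (k, v) (by simp)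
    by_cases h10 : v.keys.length = 10
    · rw [if_pos h10, if_pos h10]
      exact ih _ (fun kv hkv => hin kv (List.mem_cons_of_mem _ hkv))
    · rw [if_neg h10, if_neg h10]
      simp only [OfNat.zero_ne_ofNat, if_false]
      rw [collapse1 v.items acc (fun kv hkv => hv.2 kv hkv)]
      exact ih _ (fun kv hkv => hin kv (List.mem_cons_of_mem _ hkv))

-- ===== VERDICT (by name: the statement is the Claim_ definition above) =====
theorem reduce_cslc_bursts_to_cmr_patterns_spec : Claim_equal_reduce_cslc_bursts_to_cmr_patterns := by
  intro bs _
  unfold Spec_reduce_cslc_bursts_to_cmr_patterns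
  show reduce_cslc_bursts_to_cmr_patterns bs = reduce_cslc_bursts_to_cmr_patterns_alt bs
  have hinv := inv3_foldl bs PySem.Dict.empty inv3_empty
  have hb := build_commute bs PySem.Dict.empty inv3_empty
  have hnil : conv3 (PySem.Dict.empty : ATree3).items = BTrieL.nil := rfl
  rw [hnil] at hb
  show PySem.Set.ofList
      (((dicts3 (bs.foldl stepA PySem.Dict.empty)).items.foldl (fun s kv1 =>
          if kv1.2.keys.length = 10 then PySem.Set.add s kv1.1
          else kv1.2.items.foldl (fun s kv2 =>
            if kv2.2.keys.length = 10 then PySem.Set.add s kv2.1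
            else kv2.2.items.foldl (fun s kv3 =>
              if kv3.2.keys.length = 3 then PySem.Set.add s kv3.1
              else PySem.Set.update s (PySem.Set.ofList kv3.2.keys)) s) s)
        PySem.Set.empty).map (fun p => p ++ "*"))
    = PySem.Set.ofList
        ((btrieCollapse (bs.foldl (fun l p => btrieSetPath l [PySem.Str.slice p none (some (-7)),
            PySem.Str.slice p none (some (-6)), PySem.Str.slice p none (some (-5)), p]) BTrieL.nil)
          0 PySem.Set.empty).map (fun p => p ++ "*"))
  rw [hb, dicts3_id, collapse0 _ _ (fun kv hkv => hinv.2 kv hkv)]
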